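-- pv_equiv track=rewrite | github.com/Linalab-io/vampire-survivor | .sisyphus/evidence/final-qa/qa_gem.py | _make_castle
-- ===== SOURCE A (Python) =====
-- def _canvas(size):
--     return [["0" for _ in range(size)] for _ in range(size)]
--
-- def _set(canvas, x, y, color):
--     if 0 <= x < len(canvas[0]) and 0 <= y < len(canvas):
--         canvas[y][x] = format(color, 'x')
--
-- def _rect(canvas, x, y, width, height, color):
--     for yy in range(y, y + height):
--         for xx in range(x, x + width):
--             _set(canvas, xx, yy, color)
--
-- def _diag(canvas, x0, y0, x1, y1, color):
--     dx = abs(x1 - x0)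
--     dy = -abs(y1 - y0)
--     sx = 1 if x0 < x1 else -1
--     sy = 1 if y0 < y1 else -1
--     err = dx + dy
--     while True:
--         _set(canvas, x0, y0, color)
--         if x0 == x1 and y0 == y1:
--             break
--         step = 2 * err
--         if step >= dy:
--             err += dy
--             x0 += sx
--         if step <= dx:
--             err += dx
--             y0 += sy
--
-- def _to_data(canvas):
--     return ["".join(row) for row in canvas]
--
-- def _make_castle(variant):
--     c = _canvas(16)
--     for y in range(16):
--         shade = 2 if y < 8 else 5
--         _rect(c, 0, y, 16, 1, shade)
--     for x in range(0, 16, 4):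
--         _rect(c, x, 0, 2, 16, 5)
--         _rect(c, x + 1, 0, 1, 16, 2)
--     if variant == 0:
--         _rect(c, 6, 5, 4, 4, 6)
--         _rect(c, 7, 6, 2, 2, 1)
--     elif variant == 1:
--         _diag(c, 0, 14, 15, 8, 2)
--         _diag(c, 0, 15, 15, 9, 5)
--     elif variant == 2:
--         _rect(c, 3, 4, 2, 2, 10)
--         _rect(c, 11, 4, 2, 2, 10)
--     else:
--         _rect(c, 6, 2, 4, 4, 7)
--         _rect(c, 7, 3, 2, 2, 2)
--     return _to_data(c)
-- ===== SOURCE B (Python) =====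
-- def _pixel(variant, x, y):
--     # highest-priority feature layer first, then column stripes, then base shade
--     if variant == 0:
--         if 7 <= x < 9 and 6 <= y < 8:
--             return "1"
--         if 6 <= x < 10 and 5 <= y < 9:
--             return "6"
--     elif variant == 1:
--         d = 14 - (6 * x + 7) // 15  # closed form of the Bresenham diagonal row
--         if y == d + 1:
--             return "5"
--         if y == d:
--             return "2"
--     elif variant == 2:
--         if (3 <= x < 5 or 11 <= x < 13) and 4 <= y < 6:
--             return "a"
--     else:
--         if 7 <= x < 9 and 3 <= y < 5:
--             return "2"
--         if 6 <= x < 10 and 2 <= y < 6: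
--             return "7"
--     if x % 4 == 0:
--         return "5"
--     if x % 4 == 1:
--         return "2"
--     return "2" if y < 8 else "5"
--
-- def _make_castle(variant):
--     return ["".join(_pixel(variant, x, y) for x in range(16)) for y in range(16)]
-- ===== Notes on version B (the rewrite author's own statement) =====
-- stated objective: simpler
-- what changed: Replaces A's layered painter's-overwrite passes (base-shade rects, stripe rects, feature rects / Bresenham diagonals mutating a canvas) by a single per-pixel priority function, with the variant-1 diagonals given by a closed-form per-column row formula instead of the stepping loop.
import Mathlib
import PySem

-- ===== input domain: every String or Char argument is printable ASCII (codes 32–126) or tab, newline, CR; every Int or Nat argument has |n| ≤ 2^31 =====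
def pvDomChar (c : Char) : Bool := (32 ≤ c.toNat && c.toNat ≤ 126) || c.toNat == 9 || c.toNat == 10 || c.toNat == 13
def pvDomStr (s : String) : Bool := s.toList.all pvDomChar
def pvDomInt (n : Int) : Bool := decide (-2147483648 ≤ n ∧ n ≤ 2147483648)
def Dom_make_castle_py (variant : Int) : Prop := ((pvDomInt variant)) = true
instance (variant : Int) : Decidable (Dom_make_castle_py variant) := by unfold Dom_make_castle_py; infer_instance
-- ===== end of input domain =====

-- B replaces A's layered painter's-overwrite mutation passes by one per-pixel priority
-- function (feature layer, then column stripe, then base shade), with the variant-1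
-- Bresenham diagonals given by a closed-form per-column row formula; objective: simpler.

-- ===== PORT A =====
-- format(color, 'x') for the nonnegative colors A uses (exact for 0 ≤ color < 16)
def pvFormatHex (color : Int) : Char :=
  if color < 10 then Char.ofNat (48 + color.toNat) else Char.ofNat (87 + color.toNat)

-- _canvas(size): size×size grid of '0'
def pvCanvas (size : Nat) : List (List Char) :=
  List.replicate size (List.replicate size '0')

-- _set: guarded in-place write, returning the new canvas
def pvSet (c : List (List Char)) (x y : Int) (color : Int) : List (List Char) :=
  if 0 ≤ x ∧ x < ((c.headD []).length : Int) ∧ 0 ≤ y ∧ y < (c.length : Int) then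
    c.modify y.toNat (fun row => row.set x.toNat (pvFormatHex color))
  else c

-- _rect: the same two nested range loops
def pvRect (c : List (List Char)) (x y w h color : Int) : List (List Char) :=
  (PySem.List.pyRange y (y + h) 1).foldl (fun c yy =>
    (PySem.List.pyRange x (x + w) 1).foldl (fun c xx => pvSet c xx yy color) c) c

-- _diag's 'while True' loop, with fuel standing for the unbounded loop (never exhausted
-- on the calls A makes); state and branch order exactly as in the Python
def pvDiagLoop (fuel : Nat) (c : List (List Char)) (x0 y0 x1 y1 : Int)
    (dx dy : Int) (sx sy : Int) (err : Int) (color : Int) : List (List Char) :=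
  match fuel with
  | 0 => c
  | fuel + 1 =>
    let c := pvSet c x0 y0 color
    if x0 = x1 ∧ y0 = y1 then c
    else
      let step := 2 * err
      let (err, x0) := if step ≥ dy then (err + dy, x0 + sx) else (err, x0)
      let (err, y0) := if step ≤ dx then (err + dx, y0 + sy) else (err, y0)
      pvDiagLoop fuel c x0 y0 x1 y1 dx dy sx sy err color

def pvDiag (c : List (List Char)) (x0 y0 x1 y1 color : Int) : List (List Char) :=
  let dx := |x1 - x0|
  let dy := -|y1 - y0|
  let sx : Int := if x0 < x1 then 1 else -1
  let sy : Int := if y0 < y1 then 1 else -1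
  pvDiagLoop 64 c x0 y0 x1 y1 dx dy sx sy (dx + dy) color

def pvToData (c : List (List Char)) : List String := c.map String.mk

def make_castle_py (variant : Int) : List String :=
  let c := pvCanvas 16
  let c := (PySem.List.pyRange 0 16 1).foldl
    (fun c y => pvRect c 0 y 16 1 (if y < 8 then 2 else 5)) c
  let c := (PySem.List.pyRange 0 16 4).foldl
    (fun c x => pvRect (pvRect c x 0 2 16 5) (x + 1) 0 1 16 2) c
  let c :=
    if variant = 0 then pvRect (pvRect c 6 5 4 4 6) 7 6 2 2 1
    else if variant = 1 then pvDiag (pvDiag c 0 14 15 8 2) 0 15 15 9 5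
    else if variant = 2 then pvRect (pvRect c 3 4 2 2 10) 11 4 2 2 10
    else pvRect (pvRect c 6 2 4 4 7) 7 3 2 2 2
  pvToData c

-- ===== PORT B =====
def pvPixel (variant : Int) (x y : Int) : Char :=
  let base : Char :=
    if PySem.Int.mod x 4 = 0 then '5'
    else if PySem.Int.mod x 4 = 1 then '2'
    else if y < 8 then '2' else '5'
  if variant = 0 then
    if 7 ≤ x ∧ x < 9 ∧ 6 ≤ y ∧ y < 8 then '1'
    else if 6 ≤ x ∧ x < 10 ∧ 5 ≤ y ∧ y < 9 then '6'
    else base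
  else if variant = 1 then
    let d := 14 - PySem.Int.floordiv (6 * x + 7) 15
    if y = d + 1 then '5' else if y = d then '2' else base
  else if variant = 2 then
    if ((3 ≤ x ∧ x < 5) ∨ (11 ≤ x ∧ x < 13)) ∧ 4 ≤ y ∧ y < 6 then 'a'
    else base
  else
    if 7 ≤ x ∧ x < 9 ∧ 3 ≤ y ∧ y < 5 then '2'
    else if 6 ≤ x ∧ x < 10 ∧ 2 ≤ y ∧ y < 6 then '7'
    else base

def make_castle_py_alt (variant : Int) : List String :=
  (PySem.List.pyRange 0 16 1).map (fun y =>
    String.mk ((PySem.List.pyRange 0 16 1).map (fun x => pvPixel variant x y)))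

-- ===== PRECONDITION & SPEC =====
def Spec_make_castle_py (variant : Int) (out : List String) : Prop := out = make_castle_py_alt variant
instance (variant : Int) (out : List String) : Decidable (Spec_make_castle_py variant out) := by unfold Spec_make_castle_py; infer_instance

-- ===== CLAIM (what is proved, stated in full; the proofs are below) =====
def Claim_equal_make_castle_py : Prop := ∀ (variant : Int), Dom_make_castle_py variant → Spec_make_castle_py variant (make_castle_py variant)

-- ===== LEMMAS AND PROOFS =====
-- staged evaluation: the shared striped base canvas is evaluated to a literal in
-- quarters (QB*/QS*), then each variant branch is closed by kernel evaluation
def cB4 : List (List Char) :=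
  [['2', '2', '2', '2', '2', '2', '2', '2', '2', '2', '2', '2', '2', '2', '2', '2'],
   ['2', '2', '2', '2', '2', '2', '2', '2', '2', '2', '2', '2', '2', '2', '2', '2'],
   ['2', '2', '2', '2', '2', '2', '2', '2', '2', '2', '2', '2', '2', '2', '2', '2'],
   ['2', '2', '2', '2', '2', '2', '2', '2', '2', '2', '2', '2', '2', '2', '2', '2'],
   ['0', '0', '0', '0', '0', '0', '0', '0', '0', '0', '0', '0', '0', '0', '0', '0'],
   ['0', '0', '0', '0', '0', '0', '0', '0', '0', '0', '0', '0', '0', '0', '0', '0'],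
   ['0', '0', '0', '0', '0', '0', '0', '0', '0', '0', '0', '0', '0', '0', '0', '0'],
   ['0', '0', '0', '0', '0', '0', '0', '0', '0', '0', '0', '0', '0', '0', '0', '0'],
   ['0', '0', '0', '0', '0', '0', '0', '0', '0', '0', '0', '0', '0', '0', '0', '0'],
   ['0', '0', '0', '0', '0', '0', '0', '0', '0', '0', '0', '0', '0', '0', '0', '0'],
   ['0', '0', '0', '0', '0', '0', '0', '0', '0', '0', '0', '0', '0', '0', '0', '0'],
   ['0', '0', '0', '0', '0', '0', '0', '0', '0', '0', '0', '0', '0', '0', '0', '0'],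
   ['0', '0', '0', '0', '0', '0', '0', '0', '0', '0', '0', '0', '0', '0', '0', '0'],
   ['0', '0', '0', '0', '0', '0', '0', '0', '0', '0', '0', '0', '0', '0', '0', '0'],
   ['0', '0', '0', '0', '0', '0', '0', '0', '0', '0', '0', '0', '0', '0', '0', '0'],
   ['0', '0', '0', '0', '0', '0', '0', '0', '0', '0', '0', '0', '0', '0', '0', '0']]

def cB8 : List (List Char) :=
  [['2', '2', '2', '2', '2', '2', '2', '2', '2', '2', '2', '2', '2', '2', '2', '2'],
   ['2', '2', '2', '2', '2', '2', '2', '2', '2', '2', '2', '2', '2', '2', '2', '2'],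
   ['2', '2', '2', '2', '2', '2', '2', '2', '2', '2', '2', '2', '2', '2', '2', '2'],
   ['2', '2', '2', '2', '2', '2', '2', '2', '2', '2', '2', '2', '2', '2', '2', '2'],
   ['2', '2', '2', '2', '2', '2', '2', '2', '2', '2', '2', '2', '2', '2', '2', '2'],
   ['2', '2', '2', '2', '2', '2', '2', '2', '2', '2', '2', '2', '2', '2', '2', '2'],
   ['2', '2', '2', '2', '2', '2', '2', '2', '2', '2', '2', '2', '2', '2', '2', '2'],
   ['2', '2', '2', '2', '2', '2', '2', '2', '2', '2', '2', '2', '2', '2', '2', '2'],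
   ['0', '0', '0', '0', '0', '0', '0', '0', '0', '0', '0', '0', '0', '0', '0', '0'],
   ['0', '0', '0', '0', '0', '0', '0', '0', '0', '0', '0', '0', '0', '0', '0', '0'],
   ['0', '0', '0', '0', '0', '0', '0', '0', '0', '0', '0', '0', '0', '0', '0', '0'],
   ['0', '0', '0', '0', '0', '0', '0', '0', '0', '0', '0', '0', '0', '0', '0', '0'],
   ['0', '0', '0', '0', '0', '0', '0', '0', '0', '0', '0', '0', '0', '0', '0', '0'],
   ['0', '0', '0', '0', '0', '0', '0', '0', '0', '0', '0', '0', '0', '0', '0', '0'],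
   ['0', '0', '0', '0', '0', '0', '0', '0', '0', '0', '0', '0', '0', '0', '0', '0'],
   ['0', '0', '0', '0', '0', '0', '0', '0', '0', '0', '0', '0', '0', '0', '0', '0']]

def cB12 : List (List Char) :=
  [['2', '2', '2', '2', '2', '2', '2', '2', '2', '2', '2', '2', '2', '2', '2', '2'],
   ['2', '2', '2', '2', '2', '2', '2', '2', '2', '2', '2', '2', '2', '2', '2', '2'],
   ['2', '2', '2', '2', '2', '2', '2', '2', '2', '2', '2', '2', '2', '2', '2', '2'],
   ['2', '2', '2', '2', '2', '2', '2', '2', '2', '2', '2', '2', '2', '2', '2', '2'],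
   ['2', '2', '2', '2', '2', '2', '2', '2', '2', '2', '2', '2', '2', '2', '2', '2'],
   ['2', '2', '2', '2', '2', '2', '2', '2', '2', '2', '2', '2', '2', '2', '2', '2'],
   ['2', '2', '2', '2', '2', '2', '2', '2', '2', '2', '2', '2', '2', '2', '2', '2'],
   ['2', '2', '2', '2', '2', '2', '2', '2', '2', '2', '2', '2', '2', '2', '2', '2'],
   ['5', '5', '5', '5', '5', '5', '5', '5', '5', '5', '5', '5', '5', '5', '5', '5'],
   ['5', '5', '5', '5', '5', '5', '5', '5', '5', '5', '5', '5', '5', '5', '5', '5'],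
   ['5', '5', '5', '5', '5', '5', '5', '5', '5', '5', '5', '5', '5', '5', '5', '5'],
   ['5', '5', '5', '5', '5', '5', '5', '5', '5', '5', '5', '5', '5', '5', '5', '5'],
   ['0', '0', '0', '0', '0', '0', '0', '0', '0', '0', '0', '0', '0', '0', '0', '0'],
   ['0', '0', '0', '0', '0', '0', '0', '0', '0', '0', '0', '0', '0', '0', '0', '0'],
   ['0', '0', '0', '0', '0', '0', '0', '0', '0', '0', '0', '0', '0', '0', '0', '0'],
   ['0', '0', '0', '0', '0', '0', '0', '0', '0', '0', '0', '0', '0', '0', '0', '0']]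

def cBase : List (List Char) :=
  [['2', '2', '2', '2', '2', '2', '2', '2', '2', '2', '2', '2', '2', '2', '2', '2'],
   ['2', '2', '2', '2', '2', '2', '2', '2', '2', '2', '2', '2', '2', '2', '2', '2'],
   ['2', '2', '2', '2', '2', '2', '2', '2', '2', '2', '2', '2', '2', '2', '2', '2'],
   ['2', '2', '2', '2', '2', '2', '2', '2', '2', '2', '2', '2', '2', '2', '2', '2'],
   ['2', '2', '2', '2', '2', '2', '2', '2', '2', '2', '2', '2', '2', '2', '2', '2'],
   ['2', '2', '2', '2', '2', '2', '2', '2', '2', '2', '2', '2', '2', '2', '2', '2'],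
   ['2', '2', '2', '2', '2', '2', '2', '2', '2', '2', '2', '2', '2', '2', '2', '2'],
   ['2', '2', '2', '2', '2', '2', '2', '2', '2', '2', '2', '2', '2', '2', '2', '2'],
   ['5', '5', '5', '5', '5', '5', '5', '5', '5', '5', '5', '5', '5', '5', '5', '5'],
   ['5', '5', '5', '5', '5', '5', '5', '5', '5', '5', '5', '5', '5', '5', '5', '5'],
   ['5', '5', '5', '5', '5', '5', '5', '5', '5', '5', '5', '5', '5', '5', '5', '5'],
   ['5', '5', '5', '5', '5', '5', '5', '5', '5', '5', '5', '5', '5', '5', '5', '5'],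
   ['5', '5', '5', '5', '5', '5', '5', '5', '5', '5', '5', '5', '5', '5', '5', '5'],
   ['5', '5', '5', '5', '5', '5', '5', '5', '5', '5', '5', '5', '5', '5', '5', '5'],
   ['5', '5', '5', '5', '5', '5', '5', '5', '5', '5', '5', '5', '5', '5', '5', '5'],
   ['5', '5', '5', '5', '5', '5', '5', '5', '5', '5', '5', '5', '5', '5', '5', '5']]

def cS1 : List (List Char) :=
  [['5', '2', '2', '2', '2', '2', '2', '2', '2', '2', '2', '2', '2', '2', '2', '2'],
   ['5', '2', '2', '2', '2', '2', '2', '2', '2', '2', '2', '2', '2', '2', '2', '2'],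
   ['5', '2', '2', '2', '2', '2', '2', '2', '2', '2', '2', '2', '2', '2', '2', '2'],
   ['5', '2', '2', '2', '2', '2', '2', '2', '2', '2', '2', '2', '2', '2', '2', '2'],
   ['5', '2', '2', '2', '2', '2', '2', '2', '2', '2', '2', '2', '2', '2', '2', '2'],
   ['5', '2', '2', '2', '2', '2', '2', '2', '2', '2', '2', '2', '2', '2', '2', '2'],
   ['5', '2', '2', '2', '2', '2', '2', '2', '2', '2', '2', '2', '2', '2', '2', '2'],
   ['5', '2', '2', '2', '2', '2', '2', '2', '2', '2', '2', '2', '2', '2', '2', '2'],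
   ['5', '2', '5', '5', '5', '5', '5', '5', '5', '5', '5', '5', '5', '5', '5', '5'],
   ['5', '2', '5', '5', '5', '5', '5', '5', '5', '5', '5', '5', '5', '5', '5', '5'],
   ['5', '2', '5', '5', '5', '5', '5', '5', '5', '5', '5', '5', '5', '5', '5', '5'],
   ['5', '2', '5', '5', '5', '5', '5', '5', '5', '5', '5', '5', '5', '5', '5', '5'],
   ['5', '2', '5', '5', '5', '5', '5', '5', '5', '5', '5', '5', '5', '5', '5', '5'],
   ['5', '2', '5', '5', '5', '5', '5', '5', '5', '5', '5', '5', '5', '5', '5', '5'],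
   ['5', '2', '5', '5', '5', '5', '5', '5', '5', '5', '5', '5', '5', '5', '5', '5'],
   ['5', '2', '5', '5', '5', '5', '5', '5', '5', '5', '5', '5', '5', '5', '5', '5']]

def cS2 : List (List Char) :=
  [['5', '2', '2', '2', '5', '2', '2', '2', '2', '2', '2', '2', '2', '2', '2', '2'],
   ['5', '2', '2', '2', '5', '2', '2', '2', '2', '2', '2', '2', '2', '2', '2', '2'],
   ['5', '2', '2', '2', '5', '2', '2', '2', '2', '2', '2', '2', '2', '2', '2', '2'],
   ['5', '2', '2', '2', '5', '2', '2', '2', '2', '2', '2', '2', '2', '2', '2', '2'],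
   ['5', '2', '2', '2', '5', '2', '2', '2', '2', '2', '2', '2', '2', '2', '2', '2'],
   ['5', '2', '2', '2', '5', '2', '2', '2', '2', '2', '2', '2', '2', '2', '2', '2'],
   ['5', '2', '2', '2', '5', '2', '2', '2', '2', '2', '2', '2', '2', '2', '2', '2'],
   ['5', '2', '2', '2', '5', '2', '2', '2', '2', '2', '2', '2', '2', '2', '2', '2'],
   ['5', '2', '5', '5', '5', '2', '5', '5', '5', '5', '5', '5', '5', '5', '5', '5'],
   ['5', '2', '5', '5', '5', '2', '5', '5', '5', '5', '5', '5', '5', '5', '5', '5'],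
   ['5', '2', '5', '5', '5', '2', '5', '5', '5', '5', '5', '5', '5', '5', '5', '5'],
   ['5', '2', '5', '5', '5', '2', '5', '5', '5', '5', '5', '5', '5', '5', '5', '5'],
   ['5', '2', '5', '5', '5', '2', '5', '5', '5', '5', '5', '5', '5', '5', '5', '5'],
   ['5', '2', '5', '5', '5', '2', '5', '5', '5', '5', '5', '5', '5', '5', '5', '5'],
   ['5', '2', '5', '5', '5', '2', '5', '5', '5', '5', '5', '5', '5', '5', '5', '5'],
   ['5', '2', '5', '5', '5', '2', '5', '5', '5', '5', '5', '5', '5', '5', '5', '5']]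

def cS3 : List (List Char) :=
  [['5', '2', '2', '2', '5', '2', '2', '2', '5', '2', '2', '2', '2', '2', '2', '2'],
   ['5', '2', '2', '2', '5', '2', '2', '2', '5', '2', '2', '2', '2', '2', '2', '2'],
   ['5', '2', '2', '2', '5', '2', '2', '2', '5', '2', '2', '2', '2', '2', '2', '2'],
   ['5', '2', '2', '2', '5', '2', '2', '2', '5', '2', '2', '2', '2', '2', '2', '2'],
   ['5', '2', '2', '2', '5', '2', '2', '2', '5', '2', '2', '2', '2', '2', '2', '2'],
   ['5', '2', '2', '2', '5', '2', '2', '2', '5', '2', '2', '2', '2', '2', '2', '2'],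
   ['5', '2', '2', '2', '5', '2', '2', '2', '5', '2', '2', '2', '2', '2', '2', '2'],
   ['5', '2', '2', '2', '5', '2', '2', '2', '5', '2', '2', '2', '2', '2', '2', '2'],
   ['5', '2', '5', '5', '5', '2', '5', '5', '5', '2', '5', '5', '5', '5', '5', '5'],
   ['5', '2', '5', '5', '5', '2', '5', '5', '5', '2', '5', '5', '5', '5', '5', '5'],
   ['5', '2', '5', '5', '5', '2', '5', '5', '5', '2', '5', '5', '5', '5', '5', '5'],
   ['5', '2', '5', '5', '5', '2', '5', '5', '5', '2', '5', '5', '5', '5', '5', '5'],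
   ['5', '2', '5', '5', '5', '2', '5', '5', '5', '2', '5', '5', '5', '5', '5', '5'],
   ['5', '2', '5', '5', '5', '2', '5', '5', '5', '2', '5', '5', '5', '5', '5', '5'],
   ['5', '2', '5', '5', '5', '2', '5', '5', '5', '2', '5', '5', '5', '5', '5', '5'],
   ['5', '2', '5', '5', '5', '2', '5', '5', '5', '2', '5', '5', '5', '5', '5', '5']]

def cStripes : List (List Char) :=
  [['5', '2', '2', '2', '5', '2', '2', '2', '5', '2', '2', '2', '5', '2', '2', '2'],
   ['5', '2', '2', '2', '5', '2', '2', '2', '5', '2', '2', '2', '5', '2', '2', '2'],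
   ['5', '2', '2', '2', '5', '2', '2', '2', '5', '2', '2', '2', '5', '2', '2', '2'],
   ['5', '2', '2', '2', '5', '2', '2', '2', '5', '2', '2', '2', '5', '2', '2', '2'],
   ['5', '2', '2', '2', '5', '2', '2', '2', '5', '2', '2', '2', '5', '2', '2', '2'],
   ['5', '2', '2', '2', '5', '2', '2', '2', '5', '2', '2', '2', '5', '2', '2', '2'],
   ['5', '2', '2', '2', '5', '2', '2', '2', '5', '2', '2', '2', '5', '2', '2', '2'],
   ['5', '2', '2', '2', '5', '2', '2', '2', '5', '2', '2', '2', '5', '2', '2', '2'],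
   ['5', '2', '5', '5', '5', '2', '5', '5', '5', '2', '5', '5', '5', '2', '5', '5'],
   ['5', '2', '5', '5', '5', '2', '5', '5', '5', '2', '5', '5', '5', '2', '5', '5'],
   ['5', '2', '5', '5', '5', '2', '5', '5', '5', '2', '5', '5', '5', '2', '5', '5'],
   ['5', '2', '5', '5', '5', '2', '5', '5', '5', '2', '5', '5', '5', '2', '5', '5'],
   ['5', '2', '5', '5', '5', '2', '5', '5', '5', '2', '5', '5', '5', '2', '5', '5'],
   ['5', '2', '5', '5', '5', '2', '5', '5', '5', '2', '5', '5', '5', '2', '5', '5'],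
   ['5', '2', '5', '5', '5', '2', '5', '5', '5', '2', '5', '5', '5', '2', '5', '5'],
   ['5', '2', '5', '5', '5', '2', '5', '5', '5', '2', '5', '5', '5', '2', '5', '5']]

set_option maxRecDepth 6000 in
theorem QB0 : List.foldl (fun c y => pvRect c 0 y 16 1 (if y < 8 then 2 else 5)) (pvCanvas 16) [(0 : Int), (1 : Int), (2 : Int), (3 : Int)] = cB4 := by decide

set_option maxRecDepth 6000 in
theorem QB1 : List.foldl (fun c y => pvRect c 0 y 16 1 (if y < 8 then 2 else 5)) cB4 [(4 : Int), (5 : Int), (6 : Int), (7 : Int)] = cB8 := by decide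

set_option maxRecDepth 6000 in
theorem QB2 : List.foldl (fun c y => pvRect c 0 y 16 1 (if y < 8 then 2 else 5)) cB8 [(8 : Int), (9 : Int), (10 : Int), (11 : Int)] = cB12 := by decide

set_option maxRecDepth 6000 in
theorem QB3 : List.foldl (fun c y => pvRect c 0 y 16 1 (if y < 8 then 2 else 5)) cB12 [(12 : Int), (13 : Int), (14 : Int), (15 : Int)] = cBase := by decide

set_option maxRecDepth 6000 in
theorem QS0 : List.foldl (fun c x => pvRect (pvRect c x 0 2 16 5) (x + 1) 0 1 16 2) cBase [(0 : Int)] = cS1 := by decide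

set_option maxRecDepth 6000 in
theorem QS1 : List.foldl (fun c x => pvRect (pvRect c x 0 2 16 5) (x + 1) 0 1 16 2) cS1 [(4 : Int)] = cS2 := by decide

set_option maxRecDepth 6000 in
theorem QS2 : List.foldl (fun c x => pvRect (pvRect c x 0 2 16 5) (x + 1) 0 1 16 2) cS2 [(8 : Int)] = cS3 := by decide

set_option maxRecDepth 6000 in
theorem QS3 : List.foldl (fun c x => pvRect (pvRect c x 0 2 16 5) (x + 1) 0 1 16 2) cS3 [(12 : Int)] = cStripes := by decide

theorem L1a : (PySem.List.pyRange 0 16 1).foldl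
    (fun c y => pvRect c 0 y 16 1 (if y < 8 then 2 else 5)) (pvCanvas 16) = cBase := by
  rw [show PySem.List.pyRange 0 16 1
        = [(0:Int),1,2,3] ++ ([(4:Int),5,6,7] ++ ([(8:Int),9,10,11] ++ [(12:Int),13,14,15]))
      from by decide,
      List.foldl_append, List.foldl_append, List.foldl_append, QB0, QB1, QB2, QB3]

theorem L1b : (PySem.List.pyRange 0 16 4).foldl
    (fun c x => pvRect (pvRect c x 0 2 16 5) (x + 1) 0 1 16 2) cBase = cStripes := by
  rw [show PySem.List.pyRange 0 16 4
        = [(0:Int)] ++ ([(4:Int)] ++ ([(8:Int)] ++ [(12:Int)]))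
      from by decide,
      List.foldl_append, List.foldl_append, List.foldl_append, QS0, QS1, QS2, QS3]

theorem LA (v : Int) : make_castle_py v =
    pvToData (if v = 0 then pvRect (pvRect cStripes 6 5 4 4 6) 7 6 2 2 1
      else if v = 1 then pvDiag (pvDiag cStripes 0 14 15 8 2) 0 15 15 9 5
      else if v = 2 then pvRect (pvRect cStripes 3 4 2 2 10) 11 4 2 2 10
      else pvRect (pvRect cStripes 6 2 4 4 7) 7 3 2 2 2) := by
  simp only [make_castle_py]
  rw [L1a, L1b]

set_option maxRecDepth 6000 in
theorem L2 : pvToData (pvRect (pvRect cStripes 6 5 4 4 6) 7 6 2 2 1) = make_castle_py_alt 0 := by decide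
set_option maxRecDepth 6000 in
theorem L3 : pvToData (pvDiag (pvDiag cStripes 0 14 15 8 2) 0 15 15 9 5) = make_castle_py_alt 1 := by decide
set_option maxRecDepth 6000 in
theorem L4 : pvToData (pvRect (pvRect cStripes 3 4 2 2 10) 11 4 2 2 10) = make_castle_py_alt 2 := by decide
set_option maxRecDepth 6000 in
theorem L5 (v : Int) (h0 : ¬ v = 0) (h1 : ¬ v = 1) (h2 : ¬ v = 2) :
    pvToData (pvRect (pvRect cStripes 6 2 4 4 7) 7 3 2 2 2) = make_castle_py_alt v := by
  simp only [make_castle_py_alt, pvPixel, h0, h1, h2, if_false]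
  decide

-- ===== VERDICT (by name: the statement is the Claim_ definition above) =====
theorem make_castle_py_spec : Claim_equal_make_castle_py := by
  intro v _
  unfold Spec_make_castle_py
  by_cases h0 : v = 0
  · subst h0; rw [LA, if_pos rfl]; exact L2
  by_cases h1 : v = 1
  · subst h1; rw [LA, if_neg h0, if_pos rfl]; exact L3
  by_cases h2 : v = 2
  · subst h2; rw [LA, if_neg h0, if_neg h1, if_pos rfl]; exact L4
  · rw [LA, if_neg h0, if_neg h1, if_neg h2]; exact L5 v h0 h1 h2
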